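-- pv_equiv track=rewrite | github.com/sanmusen214/Get_some_leetcodes | 0030.py | whether_fitwordsall
-- ===== SOURCE A (Python) =====
-- def whether_fitwordsall(s,wordlist):
--     while(True):
--         f=0
--         if(len(wordlist)==0):
--             return True
--         for i in wordlist:
--             if(s.find(i)==0):
--                 wordlist.remove(i)
--                 s=s[len(i):]
--                 f=1
--                 break
--         if(f==0):
--             return False
-- ===== SOURCE B (Python) =====
-- # Non-mutating greedy re-implementation: recursion with a string offset instead of
-- # repeated slicing, startswith instead of find, and index-based removal instead of
-- # remove-by-value.  (A mutates wordlist in place; B leaves it untouched -- the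
-- # equivalence claimed is about the return value.)
-- def whether_fitwordsall(s, wordlist):
--     def go(pos, remaining):
--         if not remaining:
--             return True
--         for j, w in enumerate(remaining):
--             if s.startswith(w, pos):
--                 return go(pos + len(w), remaining[:j] + remaining[j + 1:])
--         return False
--     return go(0, list(wordlist))
-- ===== Notes on version B (the rewrite author's own statement) =====
-- stated objective: faster
-- what changed: Replaced the mutating while-loop (find==0 test, remove-by-value with its extra scan, a fresh slice copy of s each step) by a non-mutating recursion that keeps a single integer offset into s, tests prefixes with startswith(w, pos) and removes the matched word by index.
import Mathlib
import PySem

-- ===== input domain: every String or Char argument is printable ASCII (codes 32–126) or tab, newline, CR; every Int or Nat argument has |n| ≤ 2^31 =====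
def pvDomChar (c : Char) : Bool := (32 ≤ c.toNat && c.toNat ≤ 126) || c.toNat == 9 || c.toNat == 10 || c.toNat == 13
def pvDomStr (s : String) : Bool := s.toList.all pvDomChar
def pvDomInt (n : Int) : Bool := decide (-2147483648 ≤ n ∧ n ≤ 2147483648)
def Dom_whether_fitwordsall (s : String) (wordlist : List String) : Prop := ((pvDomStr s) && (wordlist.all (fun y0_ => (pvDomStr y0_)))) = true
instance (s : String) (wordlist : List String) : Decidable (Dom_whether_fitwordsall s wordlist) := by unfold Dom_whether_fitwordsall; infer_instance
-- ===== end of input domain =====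

-- B: non-mutating greedy recursion over an offset into s (index removal, startswith),
-- same return value as A's mutating while-loop (A mutates wordlist in place; B does not);
-- objective: faster by constant factor (no per-step slice copy of s, no remove-by-value scan), measured.

-- ===== PORT A =====
-- first word w in ws with s.find(w) == 0 (the for-loop's search)
def pvScanA (s : String) : List String → Option String
  | [] => none
  | w :: ws => if PySem.Str.find s w = 0 then some w else pvScanA s ws

-- the while(True) loop; fuel = wordlist.length only makes the same computation total
def pvLoopA (s : String) (ws : List String) : Nat → Bool
  | 0 => ws.isEmpty
  | fuel + 1 =>
    if ws.length = 0 then true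
    else
      match pvScanA s ws with
      | some w =>
          pvLoopA (PySem.Str.slice s (some (PySem.Str.len w)) none)
                  ((PySem.List.remove? ws w).getD ws) fuel
      | none => false

def whether_fitwordsall (s : String) (wordlist : List String) : Bool :=
  pvLoopA s wordlist wordlist.length

-- ===== PORT B =====
-- s.startswith(w, pos): exact for 0 ≤ pos (w is a prefix of s[pos:]; B only ever passes 0 ≤ pos)
def pvStartsAt (s : String) (w : String) (pos : Int) : Bool :=
  w.toList.isPrefixOf (s.toList.drop pos.toNat)

-- the enumerate-for-loop: first (j, w) with s.startswith(w, pos)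
def pvScanB (s : String) (pos : Int) : Nat → List String → Option (Nat × String)
  | _, [] => none
  | j, w :: ws => if pvStartsAt s w pos then some (j, w) else pvScanB s pos (j + 1) ws

-- go(pos, remaining); remaining[:j] + remaining[j+1:] is take j ++ drop (j+1);
-- fuel = remaining.length only makes the same recursion total
def pvGoB (s : String) : Nat → Int → List String → Bool
  | 0, _, remaining => remaining.isEmpty
  | fuel + 1, pos, remaining =>
    if remaining.isEmpty then true
    else
      match pvScanB s pos 0 remaining with
      | some (j, w) =>
          pvGoB s fuel (pos + PySem.Str.len w) (remaining.take j ++ remaining.drop (j + 1))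
      | none => false

def whether_fitwordsall_alt (s : String) (wordlist : List String) : Bool :=
  pvGoB s wordlist.length 0 wordlist

-- ===== PRECONDITION & SPEC =====
def Spec_whether_fitwordsall (s : String) (wordlist : List String) (out : Bool) : Prop := out = whether_fitwordsall_alt s wordlist
instance (s : String) (wordlist : List String) (out : Bool) : Decidable (Spec_whether_fitwordsall s wordlist out) := by unfold Spec_whether_fitwordsall; infer_instance

-- ===== CLAIM (what is proved, stated in full; the proofs are below) =====
def Claim_equal_whether_fitwordsall : Prop := ∀ (s : String) (wordlist : List String), Dom_whether_fitwordsall s wordlist → Spec_whether_fitwordsall s wordlist (whether_fitwordsall s wordlist)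

-- ===== LEMMAS AND PROOFS =====

-- s.find(w) = 0 exactly when w is a prefix of s
lemma find_eq_zero_iff (s w : String) :
    PySem.Str.find s w = 0 ↔ w.toList <+: s.toList := by
  simp only [PySem.Str.find_eq]
  constructor
  · intro h
    have hnn : (0 : Int) ≤ PySem.Chars.find s.toList w.toList := by omega
    have := PySem.Chars.find_spec (s := s.toList) (sub := w.toList) hnn
    simpa [h] using this.1
  · intro hp
    have hinf : w.toList <:+: s.toList := hp.isInfix
    have hnn : (0 : Int) ≤ PySem.Chars.find s.toList w.toList :=
      (PySem.Chars.find_nonneg_iff _ _).2 hinf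
    have hsp := PySem.Chars.find_spec (s := s.toList) (sub := w.toList) hnn
    by_contra hne
    have hpos : 0 < (PySem.Chars.find s.toList w.toList).toNat := by omega
    exact hsp.2 0 hpos (by simpa using hp)

-- the two scans agree: either both fail, or A finds exactly the word B's first index points at
lemma scan_structure (s0 : String) (pos : Int) (sA : String)
    (h : sA.toList = s0.toList.drop pos.toNat) (ws : List String) (j0 : Nat) :
    (pvScanA sA ws = none ∧ pvScanB s0 pos j0 ws = none) ∨
    ∃ pre w suf, ws = pre ++ w :: suf ∧ (∀ x ∈ pre, pvStartsAt s0 x pos = false) ∧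
      pvStartsAt s0 w pos = true ∧
      pvScanA sA ws = some w ∧ pvScanB s0 pos j0 ws = some (j0 + pre.length, w) := by
  induction ws generalizing j0 with
  | nil => exact Or.inl ⟨rfl, rfl⟩
  | cons x xs ih =>
    have hiff : (PySem.Str.find sA x = 0) ↔ pvStartsAt s0 x pos = true := by
      rw [find_eq_zero_iff, pvStartsAt, List.isPrefixOf_iff_prefix, h]
    by_cases hx : pvStartsAt s0 x pos = true
    · have hf : PySem.Str.find sA x = 0 := hiff.2 hx
      refine Or.inr ⟨[], x, xs, rfl, by simp, hx, ?_, ?_⟩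
      · rw [pvScanA, if_pos hf]
      · rw [pvScanB, if_pos hx]
        simp
    · have hfind : ¬ PySem.Str.find sA x = 0 := fun hh => hx (hiff.1 hh)
      have hxf : pvStartsAt s0 x pos = false := by
        simpa using hx
      rcases ih (j0 + 1) with ⟨ha, hb⟩ | ⟨pre, w, suf, hws, hpre, hw, ha, hb⟩
      · refine Or.inl ⟨?_, ?_⟩
        · rw [pvScanA, if_neg hfind, ha]
        · rw [pvScanB, if_neg (by simp [hxf]), hb]
      · refine Or.inr ⟨x :: pre, w, suf, by simp [hws], ?_, hw, ?_, ?_⟩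
        · intro y hy
          rcases List.mem_cons.1 hy with rfl | hy
          · exact hxf
          · exact hpre y hy
        · rw [pvScanA, if_neg hfind, ha]
        · rw [pvScanB, if_neg (by simp [hxf]), hb]
          simp only [List.length_cons, Option.some.injEq, Prod.mk.injEq]
          exact ⟨by omega, trivial⟩

-- remove-by-value of the first matching word = removal at its index
lemma remove_append_eq (pre suf : List String) (w : String) (hw : w ∉ pre) :
    PySem.List.remove? (pre ++ w :: suf) w = some (pre ++ suf) := by
  rw [PySem.List.remove?_eq_some_erase _ _ (by simp), List.erase_append_right _ hw,
    List.erase_cons_head]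

-- one loop step each: the two programs stay in lockstep
lemma loop_eq (s0 : String) (fuel : Nat) :
    ∀ (pos : Int) (ws : List String) (sA : String), 0 ≤ pos →
      sA.toList = s0.toList.drop pos.toNat → pvLoopA sA ws fuel = pvGoB s0 fuel pos ws := by
  induction fuel with
  | zero => intro pos ws sA _ _; rfl
  | succ fuel ih =>
    intro pos ws sA hpos h
    rcases scan_structure s0 pos sA h ws 0 with ⟨ha, hb⟩ | ⟨pre, w, suf, hws, hpre, hw, ha, hb⟩
    · cases ws with
      | nil => rfl
      | cons x xs => simp [pvLoopA, pvGoB, ha, hb]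
    · have hwpre : w ∉ pre := by
        intro hmem
        have := hpre w hmem
        rw [hw] at this
        cases this
      have hne : ws ≠ [] := by simp [hws]
      have hlen : PySem.Str.len w = (w.toList.length : Int) := by simp [pysem]
      have hrem : (PySem.List.remove? ws w).getD ws = pre ++ suf := by
        rw [hws, remove_append_eq pre suf w hwpre]
        rfl
      have htd : ws.take pre.length ++ ws.drop (pre.length + 1) = pre ++ suf := by
        subst hws
        simp [List.drop_append]
      have hslice : (PySem.Str.slice sA (some (PySem.Str.len w)) none).toList
          = s0.toList.drop (pos + PySem.Str.len w).toNat := by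
        have h1 : (PySem.Str.slice sA (some (PySem.Str.len w)) none).toList
            = sA.toList.drop w.toList.length := by
          rw [hlen]
          simp [pysem, PySem.List.slice_from_natCast]
        rw [h1, h, List.drop_drop]
        congr 1
        rw [hlen]
        omega
      have hA : pvLoopA sA ws (fuel + 1)
          = pvLoopA (PySem.Str.slice sA (some (PySem.Str.len w)) none)
              ((PySem.List.remove? ws w).getD ws) fuel := by
        rw [pvLoopA, if_neg (by simpa using hne), ha]
      have hB : pvGoB s0 (fuel + 1) pos ws
          = pvGoB s0 fuel (pos + PySem.Str.len w)
              (ws.take pre.length ++ ws.drop (pre.length + 1)) := by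
        rw [pvGoB, if_neg (by simpa using hne)]
        simp only [hb, Nat.zero_add]
      rw [hA, hB, hrem, htd]
      exact ih (pos + PySem.Str.len w) (pre ++ suf) _ (by rw [hlen]; omega) hslice

-- ===== VERDICT (by name: the statement is the Claim_ definition above) =====
theorem whether_fitwordsall_spec : Claim_equal_whether_fitwordsall := by
  intro s wordlist _
  unfold Spec_whether_fitwordsall whether_fitwordsall whether_fitwordsall_alt
  exact loop_eq s wordlist.length 0 wordlist s le_rfl (by simp)
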